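-- pv_equiv track=rewrite | github.com/IvanKa2x2/BBLine | bbline/parse/hand_parser.py | split_raw_hands
-- ===== SOURCE A (Python) =====
-- from typing import List, Dict, Any, Tuple
--
-- def split_raw_hands(text: str) -> List[str]:
--     """Разделяет текст с историями раздач на отдельные раздачи."""
--     out, buf = [], []
--     for line in text.splitlines():
--         if line.startswith("Poker Hand #") and buf:
--             out.append("\n".join(buf))
--             buf = [line]
--         else:
--             buf.append(line)
--     if buf:
--         out.append("\n".join(buf))
--     return out
-- ===== SOURCE B (Python) =====
-- def split_raw_hands(text):
--     """Two-pointer decomposition: for each segment start i, scan j forward to the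
--     next 'Poker Hand #' boundary, emit the slice, continue from j."""
--     lines = text.splitlines()
--     out = []
--     i, n = 0, len(lines)
--     while i < n:
--         j = i + 1
--         while j < n and not lines[j].startswith("Poker Hand #"):
--             j += 1
--         out.append("\n".join(lines[i:j]))
--         i = j
--     return out
-- ===== Notes on version B (the rewrite author's own statement) =====
-- stated objective: alternative
-- what changed: Replaced the streaming buffer-accumulate-and-flush loop with a two-pointer segmenter that scans ahead to each next 'Poker Hand #' boundary and emits each segment as a slice join.
import Mathlib
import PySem

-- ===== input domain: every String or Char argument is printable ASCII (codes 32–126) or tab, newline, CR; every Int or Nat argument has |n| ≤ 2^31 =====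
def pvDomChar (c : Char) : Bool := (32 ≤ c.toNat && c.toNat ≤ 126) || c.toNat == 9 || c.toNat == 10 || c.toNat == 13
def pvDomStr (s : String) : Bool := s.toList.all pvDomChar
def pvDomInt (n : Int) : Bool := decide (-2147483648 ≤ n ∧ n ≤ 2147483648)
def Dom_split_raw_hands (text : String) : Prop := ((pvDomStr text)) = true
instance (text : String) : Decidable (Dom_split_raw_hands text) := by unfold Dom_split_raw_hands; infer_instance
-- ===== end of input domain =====

-- B replaces A's streaming buffer-accumulate-and-flush loop with a two-pointer
-- segmenter (scan ahead to the next boundary, emit the slice); alternative, same cost.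

-- ===== PORT A =====
def pvMarker (l : String) : Bool := PySem.Str.startswith l "Poker Hand #"

def pvStepA (st : List String × List String) (line : String) : List String × List String :=
  if pvMarker line && !st.2.isEmpty then (st.1 ++ [PySem.Str.join "\n" st.2], [line])
  else (st.1, st.2 ++ [line])

def pvFinishA (st : List String × List String) : List String :=
  if !st.2.isEmpty then st.1 ++ [PySem.Str.join "\n" st.2] else st.1

def split_raw_hands (text : String) : List String :=
  pvFinishA ((PySem.Str.splitlines text).foldl pvStepA ([], []))

-- ===== PORT B =====
-- outer while loop of Source B: each step consumes one segment (head line + the scan up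
-- to the next marker, Source B's inner j-loop = takeWhile/dropWhile on the suffix)
def pvSegsB (L : List String) : List String :=
  match L with
  | [] => []
  | x :: rest =>
    PySem.Str.join "\n" (x :: rest.takeWhile (fun l => !pvMarker l)) ::
      pvSegsB (rest.dropWhile (fun l => !pvMarker l))
termination_by L.length
decreasing_by
  exact Nat.lt_succ_of_le (List.length_dropWhile_le _ _)

def split_raw_hands_alt (text : String) : List String :=
  pvSegsB (PySem.Str.splitlines text)

-- ===== PRECONDITION & SPEC =====
def Spec_split_raw_hands (text : String) (out : List String) : Prop := out = split_raw_hands_alt text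
instance (text : String) (out : List String) : Decidable (Spec_split_raw_hands text out) := by unfold Spec_split_raw_hands; infer_instance

-- ===== CLAIM (what is proved, stated in full; the proofs are below) =====
def Claim_equal_split_raw_hands : Prop := ∀ (text : String), Dom_split_raw_hands text → Spec_split_raw_hands text (split_raw_hands text)

-- ===== LEMMAS AND PROOFS =====
-- A's loop invariant: with a nonempty buffer, finishing the fold yields the emitted
-- prefix, then the buffer extended to the next marker, then B's segments of the rest.
lemma loopA_eq (L : List String) : ∀ (out buf : List String), buf ≠ [] →
    pvFinishA (L.foldl pvStepA (out, buf)) =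
      out ++ (PySem.Str.join "\n" (buf ++ L.takeWhile (fun l => !pvMarker l)) ::
        pvSegsB (L.dropWhile (fun l => !pvMarker l))) := by
  induction L with
  | nil =>
    intro out buf hbuf
    simp [pvFinishA, pvSegsB, hbuf]
  | cons l L ih =>
    intro out buf hbuf
    by_cases h : pvMarker l = true
    · have hstep : pvStepA (out, buf) l = (out ++ [PySem.Str.join "\n" buf], [l]) := by
        simp [pvStepA, h, hbuf]
      rw [List.foldl_cons, hstep, ih _ [l] (by simp)]
      simp [pvSegsB, h]
    · have h' : pvMarker l = false := by simpa using h
      have hstep : pvStepA (out, buf) l = (out, buf ++ [l]) := by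
        simp [pvStepA, h']
      rw [List.foldl_cons, hstep, ih _ (buf ++ [l]) (by simp)]
      simp [h']

-- ===== VERDICT (by name: the statement is the Claim_ definition above) =====
theorem split_raw_hands_spec : Claim_equal_split_raw_hands := by
  intro text _
  unfold Spec_split_raw_hands split_raw_hands split_raw_hands_alt
  cases h : PySem.Str.splitlines text with
  | nil => simp [pvFinishA, pvSegsB]
  | cons x rest =>
    have hstep : pvStepA ([], []) x = ([], [x]) := by simp [pvStepA]
    rw [List.foldl_cons, hstep, loopA_eq rest [] [x] (by simp)]
    simp [pvSegsB]
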